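-- pv_equiv track=rewrite | github.com/Slangoij/Algorithm_IJ | Python/Programmers/Practice/햄버거 만들기.py | solution
-- ===== SOURCE A (Python) =====
-- def make_ham(que):
--     if que[0] < 2:
--         return False
--     for i in que[1:]:
--         if i < 1:
--             return False
--
--     if que[0] < 2:
--         que[0] -= 2
--     for i in que[1:]:
--         i -= 1
--     return True
--
-- def solution(ingredient):
--     answer = 0
--     que_set = [0,0,0,0]
--
--     for i in ingredient:
--         que_set[i] += 1
--         if make_ham(que_set[1:]):
--             answer += 1
--
--     return answer
-- ===== SOURCE B (Python) =====
-- def solution(ingredient):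
--     # Counts only ever grow, so the prefixes forming a burger are exactly a suffix:
--     # record the first step at which counts[1]>=2, counts[2]>=1, counts[3]>=1 and
--     # return how many steps from there to the end.
--     counts = [0, 0, 0, 0]
--     total = 0
--     first = None
--     for x in ingredient:
--         counts[x] += 1
--         total += 1
--         if first is None and counts[1] >= 2 and counts[2] >= 1 and counts[3] >= 1:
--             first = total
--     return 0 if first is None else total - first + 1
-- ===== Notes on version B (the rewrite author's own statement) =====
-- stated objective: simpler
-- what changed: B drops the per-step make_ham helper and the answer accumulator: since counts only grow, the satisfying prefixes are a suffix, so B records the first step where the thresholds hold and returns total - first + 1 (or 0).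
import Mathlib
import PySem

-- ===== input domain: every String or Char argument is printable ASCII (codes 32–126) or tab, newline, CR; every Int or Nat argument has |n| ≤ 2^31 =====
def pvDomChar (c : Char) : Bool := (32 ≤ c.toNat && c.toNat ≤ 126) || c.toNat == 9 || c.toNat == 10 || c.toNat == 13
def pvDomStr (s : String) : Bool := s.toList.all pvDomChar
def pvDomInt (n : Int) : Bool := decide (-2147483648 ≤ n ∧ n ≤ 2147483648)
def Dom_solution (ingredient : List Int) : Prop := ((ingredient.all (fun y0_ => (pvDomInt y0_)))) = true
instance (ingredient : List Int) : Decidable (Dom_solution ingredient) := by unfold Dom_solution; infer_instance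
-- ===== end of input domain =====

-- B replaces A's per-prefix re-test (make_ham called after every element, answer += 1)
-- by recording the first step at which the thresholds hold and returning total - first + 1
-- (the satisfying prefixes are a suffix, since counts only grow): objective "simpler".


-- ===== PORT A =====
-- make_ham(que): the second 'if'/'for' of the Python are dead code (the first 'if'
-- guarantees que[0] >= 2 there, and 'i -= 1' rebinds a loop variable), so they are
-- transliterated as the no-ops they are.  que[0] on an empty list would raise; inside
-- solution que always has length 3, so the 'none' branch is unreachable.
def makeHam (que : List Int) : Bool :=
  match PySem.List.pyGet? que 0 with
  | none => false            -- unreachable in solution (que_set[1:] has length 3)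
  | some q0 =>
    if q0 < 2 then false
    else if (PySem.List.slice que (some 1) none).any (fun i => decide (i < 1)) then false
    else true

-- que_set[i] += 1 is pySetD/pyGetD, exact under Pre_ (Raise.InRange 4 i for each element).
def solutionStepA (s : List Int × Int) (i : Int) : List Int × Int :=
  let q := PySem.List.pySetD s.1 i (PySem.List.pyGetD s.1 i 0 + 1)
  (q, if makeHam (PySem.List.slice q (some 1) none) then s.2 + 1 else s.2)

def solution (ingredient : List Int) : Int :=
  (ingredient.foldl solutionStepA ([0, 0, 0, 0], 0)).2

-- ===== PORT B =====
-- state: (counts, total, first)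
def solutionStepB (s : List Int × Int × Option Int) (x : Int) :
    List Int × Int × Option Int :=
  let c := PySem.List.pySetD s.1 x (PySem.List.pyGetD s.1 x 0 + 1)
  let t := s.2.1 + 1
  let f :=
    match s.2.2 with
    | some f => some f
    | none =>
      if 2 ≤ PySem.List.pyGetD c 1 0 ∧ 1 ≤ PySem.List.pyGetD c 2 0 ∧
          1 ≤ PySem.List.pyGetD c 3 0 then some t else none
  (c, t, f)

def solution_alt (ingredient : List Int) : Int :=
  let s := ingredient.foldl solutionStepB ([0, 0, 0, 0], 0, none)
  match s.2.2 with
  | none => 0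
  | some f => s.2.1 - f + 1

-- ===== PRECONDITION & SPEC =====
-- Pre_ excludes exactly the inputs on which A raises IndexError: an element that is
-- not a valid (possibly negative) index into the 4-cell counts list makes
-- 'que_set[i] += 1' raise (B raises there too).
def Pre_solution (ingredient : List Int) : Prop :=
  ∀ x ∈ ingredient, PySem.Raise.InRange 4 x
instance (ingredient : List Int) : Decidable (Pre_solution ingredient) := by
  unfold Pre_solution; infer_instance

def pvWitness_solution : List Int := [1, 1, 2, 3, 1]

def Spec_solution (ingredient : List Int) (out : Int) : Prop := out = solution_alt ingredient
instance (ingredient : List Int) (out : Int) : Decidable (Spec_solution ingredient out) := by unfold Spec_solution; infer_instance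

-- ===== CLAIM (what is proved, stated in full; the proofs are below) =====
def Claim_equal_solution : Prop := ∀ (ingredient : List Int), Dom_solution ingredient → Pre_solution ingredient → Spec_solution ingredient (solution ingredient)

-- ===== LEMMAS AND PROOFS =====

-- The burger condition read off a counts list.
def condP (c : List Int) : Prop :=
  2 ≤ PySem.List.pyGetD c 1 0 ∧ 1 ≤ PySem.List.pyGetD c 2 0 ∧ 1 ≤ PySem.List.pyGetD c 3 0

-- Loop invariant tying A's state to B's.
def StInv (sa : List Int × Int) (sb : List Int × Int × Option Int) : Prop :=
  sa.1 = sb.1 ∧ sa.1.length = 4 ∧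
    (match sb.2.2 with
     | none => sa.2 = 0 ∧ ¬ condP sb.1
     | some f => sa.2 = sb.2.1 - f + 1 ∧ condP sb.1)

theorem makeHam_char (b c d : Int) :
    makeHam [b, c, d] = decide (2 ≤ b ∧ 1 ≤ c ∧ 1 ≤ d) := by
  simp only [makeHam, PySem.List.pyGet?_zero_cons, PySem.List.slice_from_one, List.tail_cons,
    List.any_cons, List.any_nil]
  by_cases h1 : b < 2 <;> by_cases h2 : c < 1 <;> by_cases h3 : d < 1 <;>
    simp [h1, h2, h3] <;> omega

-- make_ham(que_set[1:]) is exactly the threshold condition on a length-4 counts list.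
theorem ham_eval (M : List Int) (hM : M.length = 4) :
    makeHam (PySem.List.slice M (some 1) none) = true ↔ condP M := by
  match M, hM with
  | [a, b, c, d], _ =>
    rw [PySem.List.slice_from_one, List.tail_cons, makeHam_char]
    norm_num [condP, PySem.List.pyGetD_ofNat']

-- incrementing any cell (or incrementing nothing, out of range) preserves the condition.
theorem condP_bump (L : List Int) (x : Int) (hL : L.length = 4) (h : condP L) :
    condP (PySem.List.pySetD L x (PySem.List.pyGetD L x 0 + 1)) := by
  match L, hL with
  | [a, b, c, d], _ =>
    have hx : x = -4 ∨ x = -3 ∨ x = -2 ∨ x = -1 ∨ x = 0 ∨ x = 1 ∨ x = 2 ∨ x = 3 ∨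
        (x < -4 ∨ 4 ≤ x) := by omega
    norm_num [condP, PySem.List.pyGetD_ofNat'] at h
    rcases hx with h' | h' | h' | h' | h' | h' | h' | h' | h'
    · subst h'
      norm_num [condP, PySem.List.pySetD, PySem.List.pySet?, PySem.List.pyIdx?,
        PySem.List.pyGetD, PySem.List.pyGet?, List.set, PySem.List.pyGetD_ofNat', show Int.toNat 3 = 3 from rfl,
        show Int.toNat 2 = 2 from rfl, show Int.toNat 1 = 1 from rfl,
        show Int.toNat 0 = 0 from rfl]
      omega
    · subst h'
      norm_num [condP, PySem.List.pySetD, PySem.List.pySet?, PySem.List.pyIdx?,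
        PySem.List.pyGetD, PySem.List.pyGet?, List.set, PySem.List.pyGetD_ofNat', show Int.toNat 3 = 3 from rfl,
        show Int.toNat 2 = 2 from rfl, show Int.toNat 1 = 1 from rfl,
        show Int.toNat 0 = 0 from rfl]
      omega
    · subst h'
      norm_num [condP, PySem.List.pySetD, PySem.List.pySet?, PySem.List.pyIdx?,
        PySem.List.pyGetD, PySem.List.pyGet?, List.set, PySem.List.pyGetD_ofNat', show Int.toNat 3 = 3 from rfl,
        show Int.toNat 2 = 2 from rfl, show Int.toNat 1 = 1 from rfl,
        show Int.toNat 0 = 0 from rfl]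
      omega
    · subst h'
      norm_num [condP, PySem.List.pySetD, PySem.List.pySet?, PySem.List.pyIdx?,
        PySem.List.pyGetD, PySem.List.pyGet?, List.set, PySem.List.pyGetD_ofNat', show Int.toNat 3 = 3 from rfl,
        show Int.toNat 2 = 2 from rfl, show Int.toNat 1 = 1 from rfl,
        show Int.toNat 0 = 0 from rfl]
      omega
    · subst h'
      norm_num [condP, PySem.List.pySetD, PySem.List.pySet?, PySem.List.pyIdx?,
        PySem.List.pyGetD, PySem.List.pyGet?, List.set, PySem.List.pyGetD_ofNat', show Int.toNat 3 = 3 from rfl,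
        show Int.toNat 2 = 2 from rfl, show Int.toNat 1 = 1 from rfl,
        show Int.toNat 0 = 0 from rfl]
      omega
    · subst h'
      norm_num [condP, PySem.List.pySetD, PySem.List.pySet?, PySem.List.pyIdx?,
        PySem.List.pyGetD, PySem.List.pyGet?, List.set, PySem.List.pyGetD_ofNat', show Int.toNat 3 = 3 from rfl,
        show Int.toNat 2 = 2 from rfl, show Int.toNat 1 = 1 from rfl,
        show Int.toNat 0 = 0 from rfl]
      omega
    · subst h'
      norm_num [condP, PySem.List.pySetD, PySem.List.pySet?, PySem.List.pyIdx?,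
        PySem.List.pyGetD, PySem.List.pyGet?, List.set, PySem.List.pyGetD_ofNat', show Int.toNat 3 = 3 from rfl,
        show Int.toNat 2 = 2 from rfl, show Int.toNat 1 = 1 from rfl,
        show Int.toNat 0 = 0 from rfl]
      omega
    · subst h'
      norm_num [condP, PySem.List.pySetD, PySem.List.pySet?, PySem.List.pyIdx?,
        PySem.List.pyGetD, PySem.List.pyGet?, List.set, PySem.List.pyGetD_ofNat', show Int.toNat 3 = 3 from rfl,
        show Int.toNat 2 = 2 from rfl, show Int.toNat 1 = 1 from rfl,
        show Int.toNat 0 = 0 from rfl]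
      omega
    · have hnone : PySem.List.pySet? [a, b, c, d] x
          (PySem.List.pyGetD [a, b, c, d] x 0 + 1) = none := by
        rw [PySem.List.pySet?_eq_none_iff]
        simp only [PySem.Raise.InRange, List.length_cons, List.length_nil]
        omega
      have hset : PySem.List.pySetD [a, b, c, d] x
          (PySem.List.pyGetD [a, b, c, d] x 0 + 1) = [a, b, c, d] := by
        simp [PySem.List.pySetD, hnone]
      rw [hset]
      norm_num [condP, PySem.List.pyGetD_ofNat']
      omega

theorem inv_step (sa : List Int × Int) (sb : List Int × Int × Option Int) (x : Int)
    (h : StInv sa sb) : StInv (solutionStepA sa x) (solutionStepB sb x) := by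
  obtain ⟨sc, sans⟩ := sa
  obtain ⟨c, t, f⟩ := sb
  obtain ⟨hq, hlen, hrest⟩ := h
  simp only at hq hlen hrest
  subst hq
  have hlen' : (PySem.List.pySetD sc x (PySem.List.pyGetD sc x 0 + 1)).length = 4 := by
    rw [PySem.List.length_pySetD]; exact hlen
  simp only [StInv, solutionStepA, solutionStepB, ham_eval _ hlen', condP]
  refine ⟨trivial, hlen', ?_⟩
  have hmono := condP_bump sc x hlen
  simp only [condP] at hmono
  cases f with
  | none =>
    simp only at hrest
    obtain ⟨hans, hcond⟩ := hrest
    simp only [condP] at hcond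
    subst hans
    by_cases hc : 2 ≤ PySem.List.pyGetD (PySem.List.pySetD sc x (PySem.List.pyGetD sc x 0 + 1)) 1 0 ∧
        1 ≤ PySem.List.pyGetD (PySem.List.pySetD sc x (PySem.List.pyGetD sc x 0 + 1)) 2 0 ∧
        1 ≤ PySem.List.pyGetD (PySem.List.pySetD sc x (PySem.List.pyGetD sc x 0 + 1)) 3 0
    · simp only [if_pos hc]
      exact ⟨by omega, hc⟩
    · simp only [if_neg hc]
      exact ⟨trivial, hc⟩
  | some fv =>
    simp only at hrest
    obtain ⟨hans, hcond⟩ := hrest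
    simp only [condP] at hcond
    have hc := hmono hcond
    simp only [if_pos hc]
    exact ⟨by omega, hc⟩

theorem inv_foldl (l : List Int) (sa : List Int × Int) (sb : List Int × Int × Option Int)
    (h : StInv sa sb) : StInv (l.foldl solutionStepA sa) (l.foldl solutionStepB sb) := by
  induction l generalizing sa sb with
  | nil => exact h
  | cons x xs ih => exact ih _ _ (inv_step sa sb x h)

-- ===== VERDICT (by name: the statement is the Claim_ definition above) =====
theorem solution_spec : Claim_equal_solution := by
  intro ingredient _ _
  unfold Spec_solution solution solution_alt
  have h := inv_foldl ingredient ([0, 0, 0, 0], 0) ([0, 0, 0, 0], 0, none)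
    ⟨rfl, rfl, rfl, by unfold condP; decide⟩
  obtain ⟨-, -, hrest⟩ := h
  cases hf : (ingredient.foldl solutionStepB ([0, 0, 0, 0], 0, none)).2.2 <;>
    simp [hf] at hrest ⊢ <;> simp [hrest]
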